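-- pv_equiv track=rewrite | github.com/raja1106/Leetcode | string/paypal.py | step_index_optimized
-- ===== SOURCE A (Python) =====
-- from collections import defaultdict, Counter
--
-- def can_form_step_optimized(s1, s2):
--     # s1 should be shorter by exactly one letter
--     if len(s1) + 1 != len(s2):
--         return False
--
--     # Count frequencies of each character
--     count1 = Counter(s1)
--     count2 = Counter(s2)
--
--     # Check if adding exactly one letter forms the longer word
--     diff = 0
--     for char in count2:
--         if count2[char] > count1.get(char, 0):
--             diff += count2[char] - count1.get(char, 0)
--         if diff > 1:
--             return False
--     return diff == 1
--
-- def step_index_optimized(wordlist):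
--     index = defaultdict(list)
--     words_by_length = defaultdict(list)
--
--     # Group words by their length
--     for word in wordlist:
--         words_by_length[len(word)].append(word)
--
--     # Compare words of length L with words of length L + 1
--     for length in words_by_length:
--         if length + 1 not in words_by_length:
--             continue
--         for w1 in words_by_length[length]:
--             for w2 in words_by_length[length + 1]:
--                 if can_form_step_optimized(w1, w2):
--                     index[w1].append(w2)
--     return index
-- ===== SOURCE B (Python) =====
-- def _is_sub(xs, ys):
--     # is xs a subsequence of ys (two-pointer merge; both sorted here)
--     if not xs:
--         return True
--     if not ys:
--         return False
--     if xs[0] == ys[0]: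
--         return _is_sub(xs[1:], ys[1:])
--     return _is_sub(xs, ys[1:])
--
-- def step_index_optimized(wordlist):
--     words_by_length = {}
--     for w in wordlist:
--         words_by_length.setdefault(len(w), []).append(w)
--     index = {}
--     for length, group in words_by_length.items():
--         longer = words_by_length.get(length + 1)
--         if longer is None:
--             continue
--         longer_sorted = [(w2, sorted(w2)) for w2 in longer]
--         for w1 in group:
--             s1 = sorted(w1)
--             matches = [w2 for (w2, s2) in longer_sorted if _is_sub(s1, s2)]
--             if matches:
--                 index.setdefault(w1, []).extend(matches)
--     return index
-- ===== Notes on version B (the rewrite author's own statement) =====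
-- stated objective: faster
-- what changed: B pre-sorts each word's characters once per length group and decides 'w2 = w1 plus one letter' by a greedy two-pointer subsequence scan over the sorted characters, instead of A's building two fresh Counters for every pair and comparing per-character excesses.
import Mathlib
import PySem

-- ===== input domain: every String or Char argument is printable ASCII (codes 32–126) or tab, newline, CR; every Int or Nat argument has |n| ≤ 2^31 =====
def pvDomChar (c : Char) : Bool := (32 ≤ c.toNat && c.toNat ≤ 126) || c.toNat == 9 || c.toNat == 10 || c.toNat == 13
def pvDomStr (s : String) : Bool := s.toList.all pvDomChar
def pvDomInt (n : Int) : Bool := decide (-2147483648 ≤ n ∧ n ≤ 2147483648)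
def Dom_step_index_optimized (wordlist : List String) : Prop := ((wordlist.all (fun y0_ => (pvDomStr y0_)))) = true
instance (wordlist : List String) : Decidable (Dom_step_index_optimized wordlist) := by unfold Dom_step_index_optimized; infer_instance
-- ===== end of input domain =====

-- B replaces the per-pair Counter comparison by one pre-sort of each word and a
-- two-pointer subsequence scan over the sorted characters (objective: faster, measured).

-- ===== PORT A =====

-- the 'for char in count2' loop of can_form_step_optimized, with its early 'return False'
def canFormLoop (count1 count2 : PySem.Dict Char Int) (diff : Int) : List Char → Bool
  | [] => diff == 1
  | c :: rest =>
    let diff := if count2.getD c 0 > count1.getD c 0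
                then diff + (count2.getD c 0 - count1.getD c 0) else diff
    if diff > 1 then false else canFormLoop count1 count2 diff rest

def can_form_step_optimized (s1 s2 : String) : Bool :=
  if PySem.Str.len s1 + 1 ≠ PySem.Str.len s2 then false
  else
    let count1 := PySem.Dict.counter s1.toList
    let count2 := PySem.Dict.counter s2.toList
    canFormLoop count1 count2 0 count2.keys

def step_index_optimized (wordlist : List String) : List (String × List String) :=
  -- words_by_length[len(word)].append(word)  (defaultdict(list))
  let wbl : PySem.Dict Int (List String) :=
    wordlist.foldl (fun d w => d.modify (PySem.Str.len w) [] (· ++ [w])) PySem.Dict.empty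
  let index : PySem.Dict String (List String) :=
    wbl.keys.foldl (fun idx length =>
      if !(wbl.contains (length + 1)) then idx
      else
        (wbl.getD length []).foldl (fun idx w1 =>
          (wbl.getD (length + 1) []).foldl (fun idx w2 =>
            if can_form_step_optimized w1 w2 then idx.modify w1 [] (· ++ [w2]) else idx) idx) idx)
      PySem.Dict.empty
  index.items

-- ===== PORT B =====

-- _is_sub: greedy two-pointer subsequence scan ('for ch in ys' with cursor i into xs)
def isSubAlt (xs ys : List Char) : Bool :=
  (ys.foldl (fun i ch =>
      if i < (xs.length : Int) && PySem.List.pyGet? xs i == some ch then i + 1 else i) 0)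
    == (xs.length : Int)

def step_index_optimized_alt (wordlist : List String) : List (String × List String) :=
  -- words_by_length.setdefault(len(w), []).append(w)
  let wbl : PySem.Dict Int (List String) :=
    wordlist.foldl (fun d w => d.modify (PySem.Str.len w) [] (· ++ [w])) PySem.Dict.empty
  let index : PySem.Dict String (List String) :=
    wbl.items.foldl (fun idx p =>
      match wbl.get? (p.1 + 1) with
      | none => idx
      | some longer =>
        let longerSorted := longer.map (fun w2 => (w2, PySem.List.sorted w2.toList (fun c => c) false))
        p.2.foldl (fun idx w1 =>
          let s1 := PySem.List.sorted w1.toList (fun c => c) false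
          let ms := (longerSorted.filter (fun q => isSubAlt s1 q.2)).map (·.1)
          if ms.isEmpty then idx else idx.modify w1 [] (· ++ ms)) idx)
      PySem.Dict.empty
  index.items

-- ===== PRECONDITION & SPEC =====
def Spec_step_index_optimized (wordlist : List String) (out : List (String × List String)) : Prop := out = step_index_optimized_alt wordlist
instance (wordlist : List String) (out : List (String × List String)) : Decidable (Spec_step_index_optimized wordlist out) := by unfold Spec_step_index_optimized; infer_instance

-- ===== CLAIM (what is proved, stated in full; the proofs are below) =====
def Claim_equal_step_index_optimized : Prop := ∀ (wordlist : List String), Dom_step_index_optimized wordlist → Spec_step_index_optimized wordlist (step_index_optimized wordlist)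

-- ===== LEMMAS AND PROOFS =====

-- ---- B side: the greedy scan decides Sublist, hence (on sorted lists) Subperm ----

theorem isSubAlt_loop_iff (xs : List Char) (ys : List Char) (k : Nat) (hk : k ≤ xs.length) :
    (ys.foldl (fun i ch =>
      if i < (xs.length : Int) && PySem.List.pyGet? xs i == some ch then i + 1 else i) (k : Int))
      = (xs.length : Int) ↔ (xs.drop k).Sublist ys := by
  induction ys generalizing k with
  | nil =>
    simp only [List.foldl_nil, List.sublist_nil, List.drop_eq_nil_iff]
    constructor
    · intro h; omega
    · intro h; omega
  | cons y ys ih =>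
    simp only [List.foldl_cons]
    by_cases hlt : k < xs.length
    · have hget : PySem.List.pyGet? xs (k : Int) = some xs[k] := by
        rw [PySem.List.pyGet?_natCast]; simp [List.getElem?_eq_getElem hlt]
      by_cases heq : xs[k] = y
      · have : ((k : Int) < (xs.length : Int) && PySem.List.pyGet? xs (k:Int) == some y) = true := by
          simp [hget, heq]; omega
        rw [this]
        simp only [if_true]
        have : (k : Int) + 1 = ((k + 1 : Nat) : Int) := by push_cast; ring
        rw [this, ih (k+1) (by omega)]
        rw [← List.getElem_cons_drop hlt, heq, List.cons_sublist_cons]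
      · have : ((k : Int) < (xs.length : Int) && PySem.List.pyGet? xs (k:Int) == some y) = false := by
          simp [hget, heq]
        rw [this]
        simp only [Bool.false_eq_true, if_false, ih k hk]
        rw [← List.getElem_cons_drop hlt]
        rw [List.sublist_cons_iff]
        constructor
        · intro h; exact Or.inl h
        · rintro (h | ⟨r, hr, hsub⟩)
          · exact h
          · exact absurd (List.cons_eq_cons.mp hr).1 heq
    · have hk' : k = xs.length := by omega
      have : ((k : Int) < (xs.length : Int) && PySem.List.pyGet? xs (k:Int) == some y) = false := by
        simp; omega
      rw [this]
      simp only [Bool.false_eq_true, if_false, ih k hk]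
      subst hk'; simp

theorem isSubAlt_iff (xs ys : List Char) : isSubAlt xs ys = true ↔ xs.Sublist ys := by
  have := isSubAlt_loop_iff xs ys 0 (by omega)
  simp only [Nat.cast_zero, List.drop_zero] at this
  simp only [isSubAlt, beq_iff_eq]
  exact this

theorem sorted_sublist_iff_subperm (l1 l2 : List Char) :
    (PySem.List.sorted l1 (fun c => c) false).Sublist (PySem.List.sorted l2 (fun c => c) false)
      ↔ l1.Subperm l2 := by
  constructor
  · intro h
    exact (((PySem.List.sorted_perm l1 (fun c => c) false).symm.subperm).trans h.subperm).trans
      (PySem.List.sorted_perm l2 (fun c => c) false).subperm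
  · intro h
    have hsp : (PySem.List.sorted l1 (fun c => c) false).Subperm
        (PySem.List.sorted l2 (fun c => c) false) :=
      (((PySem.List.sorted_perm l1 (fun c => c) false).subperm).trans h).trans
        (PySem.List.sorted_perm l2 (fun c => c) false).symm.subperm
    exact List.sublist_of_subperm_of_pairwise hsp
      (PySem.List.sorted_pairwise l1 (fun c => c))
      (PySem.List.sorted_pairwise l2 (fun c => c))

-- ---- A side: the Counter loop computes the total excess of s2 over s1 ----

theorem canFormLoop_eq (c1 c2 : PySem.Dict Char Int) (ks : List Char) (diff : Int) (hd : 0 ≤ diff) :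
    canFormLoop c1 c2 diff ks
      = decide (diff + ((ks.map (fun c => max (c2.getD c 0 - c1.getD c 0) 0)).sum) = 1) := by
  induction ks generalizing diff with
  | nil =>
    show (diff == 1) = _
    rw [show ((diff == 1) = decide (diff = 1)) from by cases h : diff == 1 <;> simp_all]
    simp
  | cons c rest ih =>
    have hstep : (if c2.getD c 0 > c1.getD c 0
        then diff + (c2.getD c 0 - c1.getD c 0) else diff)
        = diff + max (c2.getD c 0 - c1.getD c 0) 0 := by
      split_ifs with h <;> omega
    rw [canFormLoop]
    show (if (if c2.getD c 0 > c1.getD c 0 then diff + (c2.getD c 0 - c1.getD c 0) else diff) > 1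
        then false
        else canFormLoop c1 c2
          (if c2.getD c 0 > c1.getD c 0 then diff + (c2.getD c 0 - c1.getD c 0) else diff) rest) = _
    rw [hstep]
    simp only [List.map_cons, List.sum_cons]
    have hrest : 0 ≤ ((rest.map (fun c => max (c2.getD c 0 - c1.getD c 0) 0)).sum) :=
      List.sum_nonneg (by intro x hx; simp at hx; obtain ⟨a, _, rfl⟩ := hx; omega)
    by_cases hgt : diff + max (c2.getD c 0 - c1.getD c 0) 0 > 1
    · rw [if_pos hgt]
      have : ¬ (diff + (max (c2.getD c 0 - c1.getD c 0) 0 +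
          (rest.map (fun c => max (c2.getD c 0 - c1.getD c 0) 0)).sum) = 1) := by omega
      simp [this]
    · rw [if_neg hgt, ih _ (by omega)]
      congr 1
      simp only [eq_iff_iff]
      constructor <;> intro h <;> omega

theorem sum_counts_split (D l : List Char) :
    ((D.map (fun c => l.count c)).sum)
      = (((D.filter (fun c => decide (c ∈ l))).map (fun c => l.count c)).sum) := by
  have h := ((List.filter_append_perm (fun c => decide (c ∈ l)) D).map
    (fun c => l.count c)).sum_eq
  simp only [List.map_append, List.sum_append] at h
  have h0 : ((D.filter (fun c => !decide (c ∈ l))).map (fun c => l.count c)).sum = 0 := by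
    apply List.sum_eq_zero
    intro x hx
    simp only [List.mem_map, List.mem_filter] at hx
    obtain ⟨c, ⟨_, hc⟩, rfl⟩ := hx
    simp at hc
    exact List.count_eq_zero_of_not_mem hc
  omega

theorem sum_counts_eq (D l : List Char) (hD : D.Nodup) (hcov : ∀ x ∈ l, x ∈ D) :
    ((D.map (fun c => l.count c)).sum) = l.length := by
  have hperm : (D.filter (fun c => decide (c ∈ l))).Perm l.dedup := by
    rw [List.perm_ext_iff_of_nodup (hD.filter _) l.nodup_dedup]
    intro a; simp [List.mem_dedup]
    intro h; exact hcov a h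
  rw [sum_counts_split, (hperm.map (fun c => l.count c)).sum_eq]
  simpa using List.sum_map_count_dedup_eq_length l

theorem sum_counts_le (D l : List Char) (hD : D.Nodup) :
    ((D.map (fun c => l.count c)).sum) ≤ l.length := by
  have hsub : (D.filter (fun c => decide (c ∈ l))).Subperm l.dedup := by
    apply List.subperm_of_subset (hD.filter _)
    intro a ha; simp at ha; simp [List.mem_dedup, ha.2]
  obtain ⟨mid, hp, hs⟩ := hsub
  rw [sum_counts_split, ← (hp.map (fun c => l.count c)).sum_eq]
  calc ((mid.map (fun c => l.count c)).sum)
      ≤ ((l.dedup.map (fun c => l.count c)).sum) :=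
        (hs.map _).sum_le_sum (by simp)
    _ = l.length := by simpa using List.sum_map_count_dedup_eq_length l

theorem sum_map_sub_of_le (D : List Char) (f g : Char → Nat) (h : ∀ x ∈ D, g x ≤ f x) :
    (D.map (fun x => f x - g x)).sum = (D.map f).sum - (D.map g).sum := by
  induction D with
  | nil => simp
  | cons a t ih =>
    have h1 : g a ≤ f a := h a (by simp)
    have h2 : (t.map g).sum ≤ (t.map f).sum :=
      List.sum_le_sum (fun i hi => h i (by simp [hi]))
    simp only [List.map_cons, List.sum_cons, ih (fun x hx => h x (by simp [hx]))]
    omega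

theorem pointwise_eq_of_sum_eq (D : List Char) (f g : Char → Nat)
    (hle : ∀ x ∈ D, g x ≤ f x) (hsum : (D.map g).sum = (D.map f).sum) :
    ∀ x ∈ D, g x = f x := by
  induction D with
  | nil => simp
  | cons a t ih =>
    have h1 : g a ≤ f a := hle a (by simp)
    have h2 : (t.map g).sum ≤ (t.map f).sum :=
      List.sum_le_sum (fun i hi => hle i (by simp [hi]))
    simp only [List.map_cons, List.sum_cons] at hsum
    have hga : g a = f a := by omega
    have hts : (t.map g).sum = (t.map f).sum := by omega
    intro x hx
    rcases List.mem_cons.mp hx with rfl | hx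
    · exact hga
    · exact ih (fun y hy => hle y (by simp [hy])) hts x hx

theorem excess_sum_eq_one_iff (l1 l2 : List Char) (hlen : l1.length + 1 = l2.length)
    (D : List Char) (hD : D.Nodup) (hmem : ∀ x, x ∈ D ↔ x ∈ l2) :
    ((D.map (fun c => max ((l2.count c : Int) - (l1.count c : Int)) 0)).sum = 1) ↔ l1.Subperm l2 := by
  have hpt : ∀ c : Char, max ((l2.count c : Int) - (l1.count c : Int)) 0
      = ((l2.count c - min (l1.count c) (l2.count c) : Nat) : Int) := by
    intro c; omega
  have hmap : (D.map (fun c => max ((l2.count c : Int) - (l1.count c : Int)) 0))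
      = (D.map (fun c => (l2.count c - min (l1.count c) (l2.count c) : Nat))).map
          (fun n : Nat => (n : Int)) := by
    rw [List.map_map]; exact List.map_congr_left (fun c _ => hpt c)
  rw [hmap, ← Nat.cast_list_sum]
  have hS2 : (D.map (fun c => l2.count c)).sum = l2.length :=
    sum_counts_eq D l2 hD (fun x hx => (hmem x).mpr hx)
  have hmin_le : ∀ x ∈ D, min (l1.count x) (l2.count x) ≤ l2.count x :=
    fun x _ => Nat.min_le_right _ _
  rw [sum_map_sub_of_le D _ _ hmin_le, hS2]
  have hSm_le2 : (D.map (fun c => min (l1.count c) (l2.count c))).sum ≤ l2.length := by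
    rw [← hS2]; exact List.sum_le_sum (fun i hi => Nat.min_le_right _ _)
  have hSm_le1 : (D.map (fun c => min (l1.count c) (l2.count c))).sum
      ≤ (D.map (fun c => l1.count c)).sum :=
    List.sum_le_sum (fun i hi => Nat.min_le_left _ _)
  have hS1_le : (D.map (fun c => l1.count c)).sum ≤ l1.length := sum_counts_le D l1 hD
  constructor
  · intro h
    have hSm : (D.map (fun c => min (l1.count c) (l2.count c))).sum = l1.length := by omega
    have hS1 : (D.map (fun c => l1.count c)).sum = l1.length := by omega
    have hpteq : ∀ x ∈ D, min (l1.count x) (l2.count x) = l1.count x :=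
      pointwise_eq_of_sum_eq D _ _ (fun x _ => Nat.min_le_left _ _) (by omega)
    rw [List.subperm_ext_iff]
    intro x hx
    by_cases hxD : x ∈ D
    · have := hpteq x hxD; omega
    · exfalso
      have hnd : (x :: D).Nodup := List.nodup_cons.mpr ⟨hxD, hD⟩
      have := sum_counts_le (x :: D) l1 hnd
      simp only [List.map_cons, List.sum_cons] at this
      exact absurd (List.count_pos_iff.mpr hx) (by omega)
  · intro h
    have hcnt : ∀ c, l1.count c ≤ l2.count c := by
      intro c
      by_cases hc : c ∈ l1
      · exact List.subperm_ext_iff.mp h c hc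
      · simp [List.count_eq_zero_of_not_mem hc]
    have hmeq : (D.map (fun c => min (l1.count c) (l2.count c)))
        = D.map (fun c => l1.count c) :=
      List.map_congr_left (fun c _ => Nat.min_eq_left (hcnt c))
    rw [hmeq, sum_counts_eq D l1 hD (fun x hx => (hmem x).mpr (h.subset hx))]
    omega

theorem canForm_iff (s1 s2 : String)
    (hlen : s1.toList.length + 1 = s2.toList.length) :
    can_form_step_optimized s1 s2 = true ↔ s1.toList.Subperm s2.toList := by
  unfold can_form_step_optimized
  rw [if_neg (by simp only [PySem.Str.len_eq, ne_eq, not_not]; omega)]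
  rw [canFormLoop_eq _ _ _ 0 le_rfl]
  rw [PySem.Dict.keys_counter]
  have hmapc : ((PySem.Set.ofList s2.toList).map
        (fun c => max ((PySem.Dict.counter s2.toList).getD c 0
          - (PySem.Dict.counter s1.toList).getD c 0) 0))
      = ((PySem.Set.ofList s2.toList).map
        (fun c => max ((s2.toList.count c : Int) - (s1.toList.count c : Int)) 0)) :=
    List.map_congr_left (fun c _ => by rw [PySem.Dict.getD_counter, PySem.Dict.getD_counter])
  rw [hmapc]
  rw [decide_eq_true_iff, zero_add]
  exact excess_sum_eq_one_iff s1.toList s2.toList hlen _ (PySem.Set.nodup_ofList _)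
    (fun x => PySem.Set.mem_ofList _ x)

-- the two per-pair tests agree on words of adjacent lengths
theorem canForm_eq_isSubAlt (w1 w2 : String)
    (hlen : w1.toList.length + 1 = w2.toList.length) :
    can_form_step_optimized w1 w2
      = isSubAlt (PySem.List.sorted w1.toList (fun c => c) false)
          (PySem.List.sorted w2.toList (fun c => c) false) := by
  rw [Bool.eq_iff_iff, canForm_iff w1 w2 hlen, isSubAlt_iff, sorted_sublist_iff_subperm]

-- ---- Dict plumbing ----

theorem modify_modify {κ ν : Type} [BEq κ] [LawfulBEq κ] (d : PySem.Dict κ ν) (k : κ)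
    (d0 : ν) (f g : ν → ν) :
    (d.modify k d0 f).modify k d0 g = d.modify k d0 (fun v => g (f v)) := by
  simp [PySem.Dict.modify, PySem.Dict.getD_insert_self, PySem.Dict.insert_insert_self]

theorem foldl_modify_append {κ ν : Type} [BEq κ] [LawfulBEq κ] (k : κ) (l : List ν)
    (hl : l ≠ []) (d : PySem.Dict κ (List ν)) :
    l.foldl (fun d x => d.modify k [] (· ++ [x])) d = d.modify k [] (· ++ l) := by
  induction l generalizing d with
  | nil => simp at hl
  | cons a t ih =>
    by_cases ht : t = []
    · subst ht; simp
    · simp only [List.foldl_cons, ih ht, modify_modify]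
      congr 1
      funext v; simp

-- ---- the grouping dict: each bucket holds exactly the words of that length ----

theorem wbl_getD (wordlist : List String) (L : Int) :
    ((wordlist.foldl (fun d w => d.modify (PySem.Str.len w) [] (· ++ [w]))
        PySem.Dict.empty).getD L [])
      = wordlist.filter (fun w => PySem.Str.len w == L) := by
  have h : wordlist.foldl (fun d w => d.modify (PySem.Str.len w) [] (· ++ [w])) PySem.Dict.empty
      = (wordlist.map (fun w => (PySem.Str.len w, w))).foldl
          (fun d p => d.modify p.1 [] (· ++ [p.2])) PySem.Dict.empty := by
    rw [List.foldl_map]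
  rw [h, PySem.Dict.getD_foldl_modify_append]
  simp [List.filter_map, Function.comp_def]

theorem wbl_nodup_keys (wordlist : List String) :
    ((wordlist.foldl (fun d w => d.modify (PySem.Str.len w) [] (· ++ [w]))
        PySem.Dict.empty).keys).Nodup :=
  PySem.Dict.nodup_keys_foldl_modify_key wordlist PySem.Str.len [] (fun _ w => (· ++ [w]))
    PySem.Dict.empty PySem.Dict.nodup_keys_empty

-- ---- assembly ----

theorem step_index_equal (wordlist : List String) :
    step_index_optimized wordlist = step_index_optimized_alt wordlist := by
  unfold step_index_optimized step_index_optimized_alt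
  set wbl : PySem.Dict Int (List String) :=
    wordlist.foldl (fun d w => d.modify (PySem.Str.len w) [] (· ++ [w])) PySem.Dict.empty
    with hwbl
  show (wbl.keys.foldl (fun idx length =>
      if !(wbl.contains (length + 1)) then idx
      else
        (wbl.getD length []).foldl (fun idx w1 =>
          (wbl.getD (length + 1) []).foldl (fun idx w2 =>
            if can_form_step_optimized w1 w2 then idx.modify w1 [] (· ++ [w2]) else idx) idx) idx)
      PySem.Dict.empty).items
    = (wbl.items.foldl (fun idx p =>
      match wbl.get? (p.1 + 1) with
      | none => idx
      | some longer =>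
        p.2.foldl (fun idx w1 =>
          if (((longer.map (fun w2 => (w2, PySem.List.sorted w2.toList (fun c => c) false))).filter
                (fun q => isSubAlt (PySem.List.sorted w1.toList (fun c => c) false) q.2)).map (·.1)).isEmpty
          then idx
          else idx.modify w1 []
            (· ++ ((longer.map (fun w2 => (w2, PySem.List.sorted w2.toList (fun c => c) false))).filter
                (fun q => isSubAlt (PySem.List.sorted w1.toList (fun c => c) false) q.2)).map (·.1))) idx)
      PySem.Dict.empty).items
  congr 1
  rw [PySem.Dict.items_eq_map_keys wbl (wbl_nodup_keys wordlist) [], List.foldl_map]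
  apply PySem.List.foldl_congr_mem
  intro idx L _
  simp only []
  rcases hget : wbl.get? (L + 1) with _ | longer
  · rw [PySem.Dict.contains_eq_isSome_get?, hget]
    rfl
  · rw [PySem.Dict.contains_eq_isSome_get?, hget]
    simp only [Option.isSome_some, Bool.not_true, Bool.false_eq_true, if_false]
    have hlonger : wbl.getD (L + 1) [] = longer := PySem.Dict.getD_of_get?_eq_some wbl [] hget
    rw [hlonger]
    apply PySem.List.foldl_congr_mem
    intro idx' w1 hw1
    have hw1len : PySem.Str.len w1 = L := by
      rw [hwbl, wbl_getD] at hw1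
      simpa using (List.mem_filter.mp hw1).2
    have hw2len : ∀ w2 ∈ longer, PySem.Str.len w2 = L + 1 := by
      intro w2 hw2
      rw [← hlonger, hwbl, wbl_getD] at hw2
      simpa using (List.mem_filter.mp hw2).2
    -- replace A's per-pair test by B's on the elements of `longer`
    rw [PySem.List.foldl_congr_mem longer _
      (fun idx w2 => if isSubAlt (PySem.List.sorted w1.toList (fun c => c) false)
          (PySem.List.sorted w2.toList (fun c => c) false)
        then idx.modify w1 [] (· ++ [w2]) else idx) idx'
      (by
        intro acc w2 hw2
        have hlen12 : w1.toList.length + 1 = w2.toList.length := by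
          have h1 := hw1len; have h2 := hw2len w2 hw2
          rw [PySem.Str.len_eq] at h1 h2
          omega
        rw [canForm_eq_isSubAlt w1 w2 hlen12])]
    rw [PySem.List.foldl_if_eq_foldl_filter]
    have hms : ((longer.map (fun w2 => (w2, PySem.List.sorted w2.toList (fun c => c) false))).filter
          (fun q => isSubAlt (PySem.List.sorted w1.toList (fun c => c) false) q.2)).map (·.1)
        = longer.filter (fun w2 => isSubAlt (PySem.List.sorted w1.toList (fun c => c) false)
            (PySem.List.sorted w2.toList (fun c => c) false)) := by
      rw [List.filter_map, List.map_map]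
      simp [Function.comp_def]
    rw [hms]
    by_cases hf : longer.filter (fun w2 => isSubAlt (PySem.List.sorted w1.toList (fun c => c) false)
        (PySem.List.sorted w2.toList (fun c => c) false)) = []
    · rw [hf]; simp
    · rw [foldl_modify_append w1 _ hf idx', if_neg (by simpa [List.isEmpty_iff] using hf)]

-- ===== VERDICT (by name: the statement is the Claim_ definition above) =====
theorem step_index_optimized_spec : Claim_equal_step_index_optimized := by
  intro wordlist _
  unfold Spec_step_index_optimized
  exact step_index_equal wordlist
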